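-- pv_equiv track=rewrite | github.com/m-petersen/lacuna | src/lacuna/core/keys.py | parse_result_key
-- ===== SOURCE A (Python) =====
-- def parse_result_key(key: str) -> dict[str, str]:
--     """
--     Parse a BIDS-style result key into its components.
--
--     Extracts key-value pairs from a structured key string in the format:
--     ``atlas-{atlas}_source-{source}[_desc-{desc}]``
--
--     Parameters
--     ----------
--     key : str
--         BIDS-style result key to parse.
--
--     Returns
--     -------
--     dict[str, str]
--         Dictionary with parsed components. Keys are "atlas", "source", "desc".
--         Missing components will not be present in the returned dict.
--
--     Raises
--     ------
--     ValueError
--         If key is empty or has invalid format.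
--
--     Examples
--     --------
--     >>> parse_result_key("atlas-Schaefer100_source-FunctionalNetworkMapping_desc-rmap")
--     {'atlas': 'Schaefer100', 'source': 'FunctionalNetworkMapping', 'desc': 'rmap'}
--
--     >>> parse_result_key("atlas-Tian_S4_source-InputMask")
--     {'atlas': 'Tian_S4', 'source': 'InputMask'}
--     """
--     if not key:
--         raise ValueError("Result key cannot be empty")
--
--     parts: dict[str, str] = {}
--
--     # Split by underscore-prefixed keys (atlas-, source-, desc-)
--     # Handle values that contain underscores by only splitting on known prefixes
--     segments = key.split("_")
--     current_key: str | None = None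
--     current_value_parts: list[str] = []
--
--     for segment in segments:
--         # Check if this starts a new key
--         if segment.startswith("atlas-"):
--             if current_key is not None:
--                 parts[current_key] = "_".join(current_value_parts)
--             current_key = "atlas"
--             current_value_parts = [segment[6:]]  # Remove "atlas-" prefix
--         elif segment.startswith("parc-"):
--             # Legacy support: treat parc- as atlas-
--             if current_key is not None:
--                 parts[current_key] = "_".join(current_value_parts)
--             current_key = "atlas"
--             current_value_parts = [segment[5:]]  # Remove "parc-" prefix
--         elif segment.startswith("source-"):
--             if current_key is not None:
--                 parts[current_key] = "_".join(current_value_parts)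
--             current_key = "source"
--             current_value_parts = [segment[7:]]  # Remove "source-" prefix
--         elif segment.startswith("desc-"):
--             if current_key is not None:
--                 parts[current_key] = "_".join(current_value_parts)
--             current_key = "desc"
--             current_value_parts = [segment[5:]]  # Remove "desc-" prefix
--         else:
--             # This is a continuation of the current value (contains underscore)
--             if current_key is not None:
--                 current_value_parts.append(segment)
--             else:
--                 raise ValueError(
--                     f"Invalid result key format: '{key}'. "
--                     "Expected format: atlas-{atlas}_source-{source}[_desc-{desc}]"
--                 )
--
--     # Don't forget the last key-value pair
--     if current_key is not None:
--         parts[current_key] = "_".join(current_value_parts)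
--
--     return parts
-- ===== SOURCE B (Python) =====
-- _PREFIXES = (
--     ("atlas-", "atlas"),
--     ("parc-", "atlas"),   # legacy: parc- folds to atlas
--     ("source-", "source"),
--     ("desc-", "desc"),
-- )
--
--
-- def parse_result_key(key: str) -> dict[str, str]:
--     """Parse a BIDS-style result key by locating prefix positions and slicing.
--
--     Scans the string once for the positions where a known prefix starts
--     (at position 0 or right after an underscore), then extracts each value
--     as the slice between its prefix end and the underscore preceding the
--     next prefix (or end of string).
--     """
--     if not key:
--         raise ValueError("Result key cannot be empty")
--
--     n = len(key)
--     matches = []  # (start, name, value_start)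
--     for i in range(n):
--         if i == 0 or key[i - 1] == "_":
--             for pref, name in _PREFIXES:
--                 if key.startswith(pref, i):
--                     matches.append((i, name, i + len(pref)))
--                     break
--
--     if not matches or matches[0][0] != 0:
--         raise ValueError(
--             f"Invalid result key format: '{key}'. "
--             "Expected format: atlas-{atlas}_source-{source}[_desc-{desc}]"
--         )
--
--     parts: dict[str, str] = {}
--     for j, (start, name, vstart) in enumerate(matches):
--         vend = n if j + 1 == len(matches) else matches[j + 1][0] - 1
--         parts[name] = key[vstart:vend]
--     return parts
-- ===== Notes on version B (the rewrite author's own statement) =====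
-- stated objective: alternative
-- what changed: Instead of splitting on '_' and re-joining accumulated value fragments, B scans once for the positions where a known prefix starts (at index 0 or after an underscore) and then slices each value directly out of the original string between consecutive prefix positions.
import Mathlib
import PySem

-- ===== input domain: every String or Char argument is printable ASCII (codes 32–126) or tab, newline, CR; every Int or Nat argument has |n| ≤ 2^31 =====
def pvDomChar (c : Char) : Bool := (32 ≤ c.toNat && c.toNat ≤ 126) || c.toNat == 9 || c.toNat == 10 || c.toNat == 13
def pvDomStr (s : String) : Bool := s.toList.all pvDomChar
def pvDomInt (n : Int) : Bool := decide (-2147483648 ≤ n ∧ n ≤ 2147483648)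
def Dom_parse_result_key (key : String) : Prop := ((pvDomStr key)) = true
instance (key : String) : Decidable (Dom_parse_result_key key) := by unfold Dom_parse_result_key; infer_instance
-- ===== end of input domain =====

-- B parses the key by locating prefix positions in one scan and slicing values out of the
-- original string, instead of A's split-on-'_' / re-join of accumulated fragments.
-- Both Pythons raise ValueError on keys not starting with a recognized prefix; Pre_ excludes exactly those.

-- ===== PORT A =====
-- helper: Python's `parts[current_key] = "_".join(current_value_parts)` guarded by `current_key is not None`
def pvFlush (parts : PySem.Dict String String) (cur : Option String)
    (vals : List (List Char)) : PySem.Dict String String :=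
  match cur with
  | some k => parts.insert k (String.ofList (PySem.Chars.join ['_'] vals))
  | none => parts

-- loop body of A; state `none` means the ValueError was raised (excluded by Pre_).
-- `segment[6:]` etc. with a nonnegative literal bound is exactly `List.drop` (PySem.List.slice_from).
def pvStep (st? : Option (PySem.Dict String String × Option String × List (List Char)))
    (seg : List Char) : Option (PySem.Dict String String × Option String × List (List Char)) :=
  match st? with
  | none => none
  | some (parts, cur, vals) =>
    if PySem.Chars.startswith seg "atlas-".toList then
      some (pvFlush parts cur vals, some "atlas", [seg.drop 6])
    else if PySem.Chars.startswith seg "parc-".toList then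
      some (pvFlush parts cur vals, some "atlas", [seg.drop 5])
    else if PySem.Chars.startswith seg "source-".toList then
      some (pvFlush parts cur vals, some "source", [seg.drop 7])
    else if PySem.Chars.startswith seg "desc-".toList then
      some (pvFlush parts cur vals, some "desc", [seg.drop 5])
    else
      match cur with
      | some _ => some (parts, cur, vals ++ [seg])
      | none => none  -- Python: raise ValueError (invalid format)

def parse_result_key (key : String) : List (String × String) :=
  if key.toList = [] then []  -- Python: raise ValueError (empty key); excluded by Pre_
  else
    match (PySem.Chars.splitOn key.toList ['_']).foldl pvStep
        (some (PySem.Dict.mk [], none, [])) with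
    | none => []  -- Python: raise ValueError; excluded by Pre_
    | some (parts, cur, vals) => (pvFlush parts cur vals).items

-- ===== PORT B =====
-- the inner `for pref, name in _PREFIXES: if key.startswith(pref, i)` (first hit wins);
-- `key.startswith(p, i)` with 0 ≤ i is prefix-of-drop.
def pvMatchAt (cs : List Char) (i : Nat) : Option (String × Nat) :=
  if PySem.Chars.startswith (cs.drop i) "atlas-".toList then some ("atlas", 6)
  else if PySem.Chars.startswith (cs.drop i) "parc-".toList then some ("atlas", 5)
  else if PySem.Chars.startswith (cs.drop i) "source-".toList then some ("source", 7)
  else if PySem.Chars.startswith (cs.drop i) "desc-".toList then some ("desc", 5)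
  else none

-- body of Source B's scanning loop
def pvScanStep (cs : List Char) (acc : List (Nat × String × Nat)) (i : Nat) :
    List (Nat × String × Nat) :=
  if i == 0 || cs[i - 1]? == some '_' then
    match pvMatchAt cs i with
    | some (n, p) => acc ++ [(i, n, i + p)]
    | none => acc
  else acc

def pvMatches (cs : List Char) : List (Nat × String × Nat) :=
  (List.range cs.length).foldl (pvScanStep cs) []

-- Source B's assignment loop; `key[vstart:vend]` with 0 ≤ vstart ≤ vend is drop/take (PySem.List.slice_natCast)
def pvAssign (cs : List Char) (parts : PySem.Dict String String) :
    List (Nat × String × Nat) → PySem.Dict String String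
  | [] => parts
  | (_, n, vs) :: rest =>
    let vend := match rest with
      | [] => cs.length
      | (s2, _, _) :: _ => s2 - 1
    pvAssign cs (parts.insert n (String.ofList ((cs.drop vs).take (vend - vs)))) rest

def parse_result_key_alt (key : String) : List (String × String) :=
  if key.toList = [] then []  -- Python: raise ValueError (empty key); excluded by Pre_
  else
    match pvMatches key.toList with
    | [] => []  -- Python: raise ValueError; excluded by Pre_
    | m :: ms =>
      if m.1 ≠ 0 then []  -- Python: raise ValueError; excluded by Pre_
      else (pvAssign key.toList (PySem.Dict.mk []) (m :: ms)).items

-- ===== PRECONDITION & SPEC =====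
-- Pre_ excludes exactly the inputs on which Python A raises ValueError: the empty string and
-- keys whose first '_'-segment does not start with a recognized prefix (equivalently: the key
-- itself does not start with one, since prefixes contain no '_').
def Pre_parse_result_key (key : String) : Prop :=
  (PySem.Str.startswith key "atlas-" || PySem.Str.startswith key "parc-" ||
   PySem.Str.startswith key "source-" || PySem.Str.startswith key "desc-") = true
instance (key : String) : Decidable (Pre_parse_result_key key) := by
  unfold Pre_parse_result_key; infer_instance

def pvWitness_parse_result_key : String := "atlas-Tian_S4_source-InputMask"

def Spec_parse_result_key (key : String) (out : List (String × String)) : Prop :=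
  out = parse_result_key_alt key
instance (key : String) (out : List (String × String)) :
    Decidable (Spec_parse_result_key key out) := by unfold Spec_parse_result_key; infer_instance

-- ===== CLAIM (what is proved, stated in full; the proofs are below) =====
def Claim_equal_parse_result_key : Prop :=
  ∀ (key : String), Dom_parse_result_key key → Pre_parse_result_key key →
    Spec_parse_result_key key (parse_result_key key)

-- ===== LEMMAS AND PROOFS =====

-- reference split on '_' used by the proofs
def splitU : List Char → List (List Char)
  | [] => [[]]
  | c :: rest =>
    if c = '_' then [] :: splitU rest
    else
      match splitU rest with
      | [] => [[c]]
      | s :: ss => (c :: s) :: ss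

-- reference join with '_'
def joinU : List (List Char) → List Char
  | [] => []
  | [s] => s
  | s :: ss => s ++ '_' :: joinU ss

-- the pair list A's fold inserts, grouped per segment run
def pairsSegs : String → List (List Char) → List (List Char) → List (String × String)
  | k, vals, [] => [(k, String.ofList (joinU vals))]
  | k, vals, s :: ss =>
    match pvMatchAt s 0 with
    | some (n, p) => (k, String.ofList (joinU vals)) :: pairsSegs n [s.drop p] ss
    | none => pairsSegs k (vals ++ [s]) ss

-- the pair list B's assignment loop inserts
def pairsB (cs : List Char) : List (Nat × String × Nat) → List (String × String)
  | [] => []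
  | (_, n, vs) :: rest =>
    (n, String.ofList ((cs.drop vs).take ((match rest with
        | [] => cs.length
        | (s2, _, _) :: _ => s2 - 1) - vs))) :: pairsB cs rest

-- abstract match list: one candidate per segment, with running offsets
def segsMatches : Nat → List (List Char) → List (Nat × String × Nat)
  | _, [] => []
  | off, s :: ss =>
    (match pvMatchAt s 0 with
     | some (n, p) => [(off, n, off + p)]
     | none => []) ++ segsMatches (off + s.length + 1) ss

-- zero-or-one hit of the scan at position i
def pvHit (cs : List Char) (i : Nat) : List (Nat × String × Nat) :=
  if i == 0 || cs[i - 1]? == some '_' then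
    match pvMatchAt cs i with
    | some (n, p) => [(i, n, i + p)]
    | none => []
  else []

lemma splitU_ne_nil (l : List Char) : splitU l ≠ [] := by
  cases l with
  | nil => simp [splitU]
  | cons c rest =>
    simp only [splitU]
    split
    · simp
    · split <;> simp

lemma splitU_go_spec : ∀ (l : List Char) (fuel : Nat), l.length < fuel →
    ∀ (cur : List Char) (acc : List (List Char)),
      PySem.Chars.splitOn.go ['_'] fuel l cur acc
        = acc.reverse ++ (splitU l).modifyHead (cur.reverse ++ ·) := by
  intro l
  induction l with
  | nil =>
    intro fuel hf cur acc
    cases fuel with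
    | zero => omega
    | succ f => simp [PySem.Chars.splitOn.go, splitU]
  | cons c rest ih =>
    intro fuel hf cur acc
    cases fuel with
    | zero => omega
    | succ f =>
      by_cases hc : c = '_'
      · subst hc
        have hpre : List.isPrefixOf ['_'] ('_' :: rest) = true := by
          simp [List.isPrefixOf]
        simp only [PySem.Chars.splitOn.go, hpre, if_pos]
        rw [show List.drop (['_'].length) ('_' :: rest) = rest by simp]
        rw [ih f (by simpa using hf) [] (cur.reverse :: acc)]
        simp [splitU]
        rcases splitU rest with _ | ⟨sh, ss⟩ <;> simp [List.modifyHead]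
      · have hpre : List.isPrefixOf ['_'] (c :: rest) = false := by
          simp [List.isPrefixOf]
          exact fun h => (hc h.symm).elim
        simp only [PySem.Chars.splitOn.go]
        rw [if_neg (by simp [hpre])]
        rw [ih f (by simpa using hf) (c :: cur) acc]
        simp only [splitU, if_neg hc]
        rcases h : splitU rest with _ | ⟨s, ss⟩
        · exact absurd h (splitU_ne_nil rest)
        · simp

lemma splitOn_eq_splitU (cs : List Char) : PySem.Chars.splitOn cs ['_'] = splitU cs := by
  unfold PySem.Chars.splitOn
  rw [splitU_go_spec cs (cs.length + 1) (by omega) [] []]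
  rcases h : splitU cs with _ | ⟨s, ss⟩
  · exact absurd h (splitU_ne_nil cs)
  · simp

lemma splitU_no_sep {l : List Char} (h : '_' ∉ l) : splitU l = [l] := by
  induction l with
  | nil => simp [splitU]
  | cons c rest ih =>
    have hc : c ≠ '_' := fun hc => h (hc ▸ List.mem_cons_self)
    have hr : '_' ∉ rest := fun hr => h (List.mem_cons_of_mem _ hr)
    simp [splitU, hc, ih hr]

lemma splitU_append {a : List Char} (b : List Char) (ha : '_' ∉ a) :
    splitU (a ++ '_' :: b) = a :: splitU b := by
  induction a with
  | nil => simp [splitU]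
  | cons c a' ih =>
    have hc : c ≠ '_' := fun hc => ha (hc ▸ List.mem_cons_self)
    have ha' : '_' ∉ a' := fun h => ha (List.mem_cons_of_mem _ h)
    simp only [List.cons_append, splitU, if_neg hc, ih ha']

lemma join_eq_joinU : ∀ ss : List (List Char), PySem.Chars.join ['_'] ss = joinU ss := by
  intro ss
  induction ss with
  | nil => simp [PySem.Chars.join, joinU, List.intercalate]
  | cons s ss ih =>
    cases ss with
    | nil => simp [PySem.Chars.join, joinU, List.intercalate]
    | cons t ts =>
      simp only [PySem.Chars.join, List.intercalate] at ih ⊢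
      simp [List.intersperse, joinU] at ih ⊢
      rw [← ih]

lemma joinU_cons (s : List Char) (ss : List (List Char)) :
    joinU (s :: ss) = s ++ (if ss = [] then [] else '_' :: joinU ss) := by
  cases ss <;> simp [joinU]

lemma joinU_append_singleton {vals : List (List Char)} (s : List Char) (h : vals ≠ []) :
    joinU (vals ++ [s]) = joinU vals ++ '_' :: s := by
  induction vals with
  | nil => exact absurd rfl h
  | cons v vs ih =>
    cases vs with
    | nil => simp [joinU]
    | cons w ws =>
      have := ih (by simp)
      simp only [List.cons_append, joinU] at this ⊢
      rw [this]
      simp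

lemma joinU_splitU (l : List Char) : joinU (splitU l) = l := by
  induction l with
  | nil => simp [splitU, joinU]
  | cons c rest ih =>
    by_cases hc : c = '_'
    · subst hc
      have hsp : splitU ('_' :: rest) = [] :: splitU rest := by simp [splitU]
      rw [hsp, joinU_cons, if_neg (splitU_ne_nil rest)]
      simp [ih]
    · simp only [splitU, if_neg hc]
      rcases h : splitU rest with _ | ⟨s, ss⟩
      · exact absurd h (splitU_ne_nil rest)
      · rw [h] at ih
        cases ss with
        | nil => simp [joinU] at ih ⊢; simp [ih]
        | cons t ts =>
          simp only [joinU] at ih ⊢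
          rw [List.cons_append, ih]

-- a prefix without '_' matches (a ++ '_' :: t) iff it matches a
lemma prefix_append_sep {pref a t : List Char} (hp : '_' ∉ pref) :
    pref <+: (a ++ '_' :: t) ↔ pref <+: a := by
  constructor
  · intro h
    by_cases hl : pref.length ≤ a.length
    · have h1 := List.prefix_iff_eq_take.mp h
      rw [List.take_append_of_le_length hl] at h1
      rw [h1]
      exact List.take_prefix _ a
    · exfalso
      obtain ⟨r, hr⟩ := h
      have h1 : (pref ++ r)[a.length]? = pref[a.length]? :=
        List.getElem?_append_left (by omega)
      have h2 : (a ++ '_' :: t)[a.length]? = some '_' := by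
        rw [List.getElem?_append_right (le_refl _)]
        simp
      rw [hr, h2] at h1
      exact hp (List.mem_of_getElem? h1.symm)
  · intro h
    exact h.trans (List.prefix_append a ('_' :: t))

lemma startswith_append_sep (a t pref : List Char) (hp : '_' ∉ pref) :
    PySem.Chars.startswith (a ++ '_' :: t) pref = PySem.Chars.startswith a pref := by
  rcases h : PySem.Chars.startswith a pref with _ | _
  · rw [Bool.eq_false_iff]
    intro hcon
    rw [PySem.Chars.startswith_iff] at hcon
    rw [← Bool.not_eq_true, PySem.Chars.startswith_iff] at h
    exact h ((prefix_append_sep hp).mp hcon)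
  · rw [PySem.Chars.startswith_iff] at h ⊢
    exact (prefix_append_sep hp).mpr h

lemma matchAt_append (a t : List Char) :
    pvMatchAt (a ++ '_' :: t) 0 = pvMatchAt a 0 := by
  unfold pvMatchAt
  have e1 := startswith_append_sep a t "atlas-".toList (by decide)
  have e2 := startswith_append_sep a t "parc-".toList (by decide)
  have e3 := startswith_append_sep a t "source-".toList (by decide)
  have e4 := startswith_append_sep a t "desc-".toList (by decide)
  simp only [List.drop_zero, e1, e2, e3, e4]
  rfl

lemma matchAt_shift (a b : List Char) (j : Nat) :
    pvMatchAt (a ++ '_' :: b) (a.length + 1 + j) = pvMatchAt b j := by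
  unfold pvMatchAt
  have hdrop : (a ++ '_' :: b).drop (a.length + 1 + j) = b.drop j := by
    rw [show a.length + 1 + j = a.length + (1 + j) by omega]
    rw [List.drop_append]
    rw [show 1 + j = j + 1 by omega]
    simp
  rw [hdrop]

lemma matchAt_le {s : List Char} {n : String} {p : Nat}
    (h : pvMatchAt s 0 = some (n, p)) : p ≤ s.length := by
  unfold pvMatchAt at h
  simp only [List.drop_zero] at h
  split_ifs at h with h1 h2 h3 h4
  · simp only [Option.some.injEq, Prod.mk.injEq] at h
    obtain ⟨-, rfl⟩ := h
    have hle := List.IsPrefix.length_le ((PySem.Chars.startswith_iff _ _).mp h1)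
    have he : ("atlas-".toList).length = 6 := by decide
    omega
  · simp only [Option.some.injEq, Prod.mk.injEq] at h
    obtain ⟨-, rfl⟩ := h
    have hle := List.IsPrefix.length_le ((PySem.Chars.startswith_iff _ _).mp h2)
    have he : ("parc-".toList).length = 5 := by decide
    omega
  · simp only [Option.some.injEq, Prod.mk.injEq] at h
    obtain ⟨-, rfl⟩ := h
    have hle := List.IsPrefix.length_le ((PySem.Chars.startswith_iff _ _).mp h3)
    have he : ("source-".toList).length = 7 := by decide
    omega
  · simp only [Option.some.injEq, Prod.mk.injEq] at h
    obtain ⟨-, rfl⟩ := h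
    have hle := List.IsPrefix.length_le ((PySem.Chars.startswith_iff _ _).mp h4)
    have he : ("desc-".toList).length = 5 := by decide
    omega

lemma matchAt_nil : pvMatchAt [] 0 = none := by decide

-- scan-loop characterization: fold = flatMap of per-position hits
lemma scanStep_eq (cs : List Char) (acc : List (Nat × String × Nat)) (i : Nat) :
    pvScanStep cs acc i = acc ++ pvHit cs i := by
  unfold pvScanStep pvHit
  split_ifs with h
  · rcases pvMatchAt cs i with _ | ⟨n, p⟩ <;> simp
  · simp

lemma pvMatches_flatMap (cs : List Char) :
    pvMatches cs = (List.range cs.length).flatMap (pvHit cs) := by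
  unfold pvMatches
  suffices h : ∀ (l : List Nat) (acc : List (Nat × String × Nat)),
      l.foldl (pvScanStep cs) acc = acc ++ l.flatMap (pvHit cs) by
    simpa using h (List.range cs.length) []
  intro l
  induction l with
  | nil => simp
  | cons i l ih =>
    intro acc
    rw [List.foldl_cons, scanStep_eq, ih]
    simp

lemma pvHit_zero (cs : List Char) :
    pvHit cs 0 = (match pvMatchAt cs 0 with
      | some (n, p) => [(0, n, 0 + p)]
      | none => []) := by
  unfold pvHit
  simp

lemma pvHit_inner {a : List Char} (t : List Char) {i : Nat} (hi : i < a.length)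
    (ha : '_' ∉ a) : pvHit (a ++ t) (i + 1) = [] := by
  unfold pvHit
  have h1 : (a ++ t)[i + 1 - 1]? = some a[i] := by
    simp only [Nat.add_sub_cancel]
    rw [List.getElem?_append_left hi]
    simp [hi]
  rw [if_neg]
  simp only [h1]
  have : a[i] ≠ '_' := fun hc => ha (hc ▸ a.getElem_mem hi)
  simp [this]

lemma pvHit_shift (a b : List Char) (j : Nat) :
    pvHit (a ++ '_' :: b) (a.length + 1 + j)
      = (pvHit b j).map (fun m => (a.length + 1 + m.1, m.2.1, a.length + 1 + m.2.2)) := by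
  unfold pvHit
  have hcond : ((a.length + 1 + j == 0) || (a ++ '_' :: b)[a.length + 1 + j - 1]? == some '_')
      = ((j == 0) || b[j - 1]? == some '_') := by
    cases j with
    | zero =>
      simp
    | succ j' =>
      have hg : (a ++ '_' :: b)[a.length + 1 + j']? = b[j']? := by
        rw [show a.length + 1 + j' = a.length + (j' + 1) by omega]
        rw [List.getElem?_append_right (by omega)]
        simp
      simp [hg]
  rw [hcond, matchAt_shift]
  split_ifs with h
  · rcases pvMatchAt b j with _ | ⟨n, p⟩
    · simp
    · simp
      omega
  · simp

lemma segsMatches_shift (c : Nat) : ∀ (ss : List (List Char)) (off : Nat),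
    segsMatches (c + off) ss
      = (segsMatches off ss).map (fun m => (c + m.1, m.2.1, c + m.2.2)) := by
  intro ss
  induction ss with
  | nil => intro off; simp [segsMatches]
  | cons s ss ih =>
    intro off
    simp only [segsMatches]
    rw [show c + off + s.length + 1 = c + (off + s.length + 1) by omega, ih]
    rcases pvMatchAt s 0 with _ | ⟨n, p⟩
    · simp
    · simp
      omega

lemma matches_decomp {a : List Char} (b : List Char) (ha : '_' ∉ a) :
    pvMatches (a ++ '_' :: b)
      = pvHit (a ++ '_' :: b) 0
        ++ (pvMatches b).map (fun m => (a.length + 1 + m.1, m.2.1, a.length + 1 + m.2.2)) := by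
  rw [pvMatches_flatMap, pvMatches_flatMap]
  have hlen : (a ++ '_' :: b).length = (a.length + 1) + b.length := by simp; omega
  rw [hlen, List.range_add, List.flatMap_append]
  congr 1
  · -- positions 0..a.length: only 0 hits
    rw [List.range_succ_eq_map]
    rw [List.flatMap_cons]
    have : ∀ i ∈ List.range a.length, pvHit (a ++ '_' :: b) (i + 1) = [] := by
      intro i hi
      exact pvHit_inner ('_' :: b) (List.mem_range.mp hi) ha
    have h2 : (List.map Nat.succ (List.range a.length)).flatMap (pvHit (a ++ '_' :: b)) = [] := by
      rw [List.flatMap_map]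
      apply List.flatMap_eq_nil_iff.mpr
      intro i hi
      exact this i hi
    rw [h2, List.append_nil]
  · rw [List.flatMap_map, List.map_flatMap]
    have hfun : (fun i => pvHit (a ++ '_' :: b) (a.length + 1 + i))
        = fun i => (pvHit b i).map
            (fun m => (a.length + 1 + m.1, m.2.1, a.length + 1 + m.2.2)) :=
      funext (pvHit_shift a b)
    rw [show (fun i => pvHit (a ++ '_' :: b) ((a.length + 1) + i))
        = fun i => (pvHit b i).map
            (fun m => (a.length + 1 + m.1, m.2.1, a.length + 1 + m.2.2)) from hfun]

-- '_' ∉ cs, or cs splits at the first '_'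
lemma decomp_sep (cs : List Char) :
    '_' ∉ cs ∨ ∃ a b, '_' ∉ a ∧ cs = a ++ '_' :: b := by
  induction cs with
  | nil => left; simp
  | cons c rest ih =>
    by_cases hc : c = '_'
    · right; exact ⟨[], rest, by simp, by simp [hc]⟩
    · rcases ih with h | ⟨a, b, ha, hab⟩
      · left
        intro hmem
        rcases List.mem_cons.mp hmem with h1 | h1
        · exact hc h1.symm
        · exact h h1
      · right
        refine ⟨c :: a, b, ?_, by simp [hab]⟩
        intro hmem
        rcases List.mem_cons.mp hmem with h1 | h1
        · exact hc h1.symm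
        · exact ha h1

lemma pvMatches_eq_aux : ∀ (n : Nat) (cs : List Char), cs.length ≤ n →
    pvMatches cs = segsMatches 0 (splitU cs) := by
  intro n
  induction n with
  | zero =>
    intro cs hlen
    have : cs = [] := List.eq_nil_of_length_eq_zero (Nat.le_zero.mp hlen)
    subst this
    decide
  | succ n ih =>
    intro cs hlen
    rcases decomp_sep cs with h | ⟨a, b, ha, rfl⟩
    · rw [splitU_no_sep h]
      cases cs with
      | nil => decide
      | cons c rest =>
        rw [pvMatches_flatMap]
        simp only [List.length_cons, segsMatches]
        rw [List.range_succ_eq_map, List.flatMap_cons]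
        have h2 : (List.map Nat.succ (List.range rest.length)).flatMap
            (pvHit (c :: rest)) = [] := by
          rw [List.flatMap_map]
          apply List.flatMap_eq_nil_iff.mpr
          intro i hi
          have hi' : i < (c :: rest).length := by
            have := List.mem_range.mp hi
            simp
            omega
          have hh := pvHit_inner (a := c :: rest) (t := []) (i := i) hi' h
          simpa using hh
        rw [h2, List.append_nil, pvHit_zero]
        rcases pvMatchAt (c :: rest) 0 with _ | ⟨nm, p⟩
        · simp
        · simp
    · rw [splitU_append b ha, matches_decomp b ha]
      rw [ih b (by simp at hlen; omega)]
      simp only [segsMatches]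
      rw [pvHit_zero, matchAt_append]
      have hshift : segsMatches (0 + a.length + 1) (splitU b)
          = (segsMatches 0 (splitU b)).map
              (fun m => (a.length + 1 + m.1, m.2.1, a.length + 1 + m.2.2)) := by
        rw [show (0 + a.length + 1) = (a.length + 1) + 0 by omega]
        exact segsMatches_shift (a.length + 1) (splitU b) 0
      rw [hshift]

lemma pvMatches_eq (cs : List Char) : pvMatches cs = segsMatches 0 (splitU cs) :=
  pvMatches_eq_aux cs.length cs (le_refl _)

-- A's step on a matching / non-matching segment
lemma pvStep_match {s : List Char} {n : String} {p : Nat}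
    (h : pvMatchAt s 0 = some (n, p)) (parts : PySem.Dict String String)
    (cur : Option String) (vals : List (List Char)) :
    pvStep (some (parts, cur, vals)) s
      = some (pvFlush parts cur vals, some n, [s.drop p]) := by
  unfold pvMatchAt at h
  simp only [List.drop_zero] at h
  unfold pvStep
  split_ifs at h ⊢ <;> simp_all

lemma pvStep_nomatch {s : List Char} (h : pvMatchAt s 0 = none)
    (parts : PySem.Dict String String) (k : String) (vals : List (List Char)) :
    pvStep (some (parts, some k, vals)) s = some (parts, some k, vals ++ [s]) := by
  unfold pvMatchAt at h
  simp only [List.drop_zero] at h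
  unfold pvStep
  split_ifs at h ⊢
  all_goals simp_all

-- A's fold computes the insert-fold of pairsSegs
lemma foldA : ∀ (segs : List (List Char)) (parts : PySem.Dict String String)
    (k : String) (vals : List (List Char)),
    Option.map (fun st => pvFlush st.1 st.2.1 st.2.2)
        (segs.foldl pvStep (some (parts, some k, vals)))
      = some ((pairsSegs k vals segs).foldl (fun d q => d.insert q.1 q.2) parts) := by
  intro segs
  induction segs with
  | nil =>
    intro parts k vals
    simp [pairsSegs, pvFlush, join_eq_joinU]
  | cons s ss ih =>
    intro parts k vals
    rcases h : pvMatchAt s 0 with _ | ⟨n, p⟩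
    · rw [List.foldl_cons, pvStep_nomatch h]
      simp only [pairsSegs, h]
      exact ih parts k (vals ++ [s])
    · rw [List.foldl_cons, pvStep_match h]
      simp only [pairsSegs, h, List.foldl_cons]
      rw [ih]
      simp [pvFlush, join_eq_joinU]

-- B's assignment loop computes the insert-fold of pairsB
lemma assign_eq (cs : List Char) : ∀ (ms : List (Nat × String × Nat))
    (parts : PySem.Dict String String),
    pvAssign cs parts ms = (pairsB cs ms).foldl (fun d q => d.insert q.1 q.2) parts := by
  intro ms
  induction ms with
  | nil => intro parts; simp [pvAssign, pairsB]
  | cons m rest ih =>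
    intro parts
    obtain ⟨x, n, vs⟩ := m
    simp only [pvAssign, pairsB, List.foldl_cons]
    exact ih _

-- the crux: B's sliced pairs coincide with A's grouped-and-joined pairs
lemma pairsB_eq (cs : List Char) : ∀ (ss : List (List Char)) (b vstart : Nat)
    (k : String) (vals : List (List Char)) (x : Nat),
    b ≤ cs.length → vstart ≤ b →
    cs.drop b = (if ss = [] then [] else '_' :: joinU ss) →
    (cs.drop vstart).take (b - vstart) = joinU vals →
    vals ≠ [] →
    pairsB cs ((x, k, vstart) :: segsMatches (b + 1) ss) = pairsSegs k vals ss := by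
  intro ss
  induction ss with
  | nil =>
    intro b vstart k vals x hb hv h1 h2 hne
    rw [if_pos rfl] at h1
    have hblen : b = cs.length := by
      have := List.drop_eq_nil_iff.mp h1
      omega
    subst hblen
    simp only [segsMatches, pairsB, pairsSegs, h2]
  | cons s ss' ih =>
    intro b vstart k vals x hb hv h1 h2 hne
    rw [if_neg (by simp)] at h1
    have hjoin := joinU_cons s ss'
    have hlenb : b + 1 + s.length ≤ cs.length := by
      have hlen := congrArg List.length h1
      simp only [List.length_drop, List.length_cons, hjoin, List.length_append] at hlen
      omega
    have hdropb1 : cs.drop (b + 1) = s ++ (if ss' = [] then [] else '_' :: joinU ss') := by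
      have : cs.drop (b + 1) = (cs.drop b).drop 1 := by
        rw [List.drop_drop]
      rw [this, h1, hjoin]
      simp
    have hdropb' : cs.drop (b + 1 + s.length)
        = (if ss' = [] then [] else '_' :: joinU ss') := by
      have : cs.drop (b + 1 + s.length) = (cs.drop (b + 1)).drop s.length := by
        rw [List.drop_drop]
      rw [this, hdropb1, List.drop_left]
    have hvallen : (joinU vals).length = b - vstart := by
      have := congrArg List.length h2
      simp only [List.length_take, List.length_drop] at this
      omega
    have hdropvs : cs.drop vstart
        = joinU vals ++ '_' :: (s ++ (if ss' = [] then [] else '_' :: joinU ss')) := by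
      conv_lhs => rw [← List.take_append_drop (b - vstart) (cs.drop vstart)]
      rw [h2, List.drop_drop]
      rw [show vstart + (b - vstart) = b by omega, h1, hjoin]
    rcases hm : pvMatchAt s 0 with _ | ⟨n, p⟩
    · simp only [segsMatches, hm, List.nil_append, pairsSegs]
      rw [show b + 1 + s.length + 1 = (b + 1 + s.length) + 1 by omega]
      apply ih (b + 1 + s.length) vstart k (vals ++ [s]) x hlenb (by omega) hdropb'
      · rw [joinU_append_singleton s hne]
        rw [hdropvs]
        rw [show b + 1 + s.length - vstart = (joinU vals).length + (s.length + 1) by omega]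
        rw [List.take_append]
        rw [List.take_of_length_le (by omega)]
        rw [Nat.add_sub_cancel_left]
        rw [List.take_succ_cons, List.take_left]
      · simp
    · have hp : p ≤ s.length := matchAt_le hm
      simp only [segsMatches, hm, List.singleton_append, pairsB]
      rw [pairsSegs]  -- cons case
      simp only [hm]
      congr 1
      · simp only [Nat.add_sub_cancel, h2]
      · rw [show b + 1 + s.length + 1 = (b + 1 + s.length) + 1 by omega]
        apply ih (b + 1 + s.length) (b + 1 + p) n [s.drop p] (b + 1) hlenb (by omega) hdropb'
        · have hdrop : cs.drop (b + 1 + p) = s.drop p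
              ++ (if ss' = [] then [] else '_' :: joinU ss') := by
            have : cs.drop (b + 1 + p) = (cs.drop (b + 1)).drop p := by
              rw [List.drop_drop]
            rw [this, hdropb1, List.drop_append_of_le_length hp]
          rw [hdrop]
          rw [show b + 1 + s.length - (b + 1 + p) = (s.drop p).length by
            rw [List.length_drop]; omega]
          rw [List.take_left]
          rfl
        · simp

-- A's whole computation, given that the first segment matches
lemma A_eq_pairs {n0 : String} {p0 : Nat} (s0 : List Char) (rest : List (List Char))
    (hm : pvMatchAt s0 0 = some (n0, p0)) :
    (match (s0 :: rest).foldl pvStep (some (PySem.Dict.mk [], none, [])) with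
     | none => ([] : List (String × String))
     | some (parts, cur, vals) => (pvFlush parts cur vals).items)
    = ((pairsSegs n0 [s0.drop p0] rest).foldl (fun d q => d.insert q.1 q.2)
        (PySem.Dict.mk [])).items := by
  rw [List.foldl_cons, pvStep_match hm]
  have h := foldA rest (pvFlush (PySem.Dict.mk []) none []) n0 [s0.drop p0]
  rcases hres : rest.foldl pvStep
      (some (pvFlush (PySem.Dict.mk []) none [], some n0, [s0.drop p0])) with _ | st
  · rw [hres] at h
    simp at h
  · obtain ⟨parts, cur, vals⟩ := st
    rw [hres] at h
    simp only [Option.map_some, Option.some.injEq] at h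
    show (pvFlush parts cur vals).items = _
    rw [show pvFlush parts cur vals
        = (pairsSegs n0 [s0.drop p0] rest).foldl (fun d q => d.insert q.1 q.2)
            (pvFlush (PySem.Dict.mk []) none []) from h]
    rfl

lemma pre_matchAt {key : String} (h : Pre_parse_result_key key) :
    ∃ n p, pvMatchAt key.toList 0 = some (n, p) := by
  unfold Pre_parse_result_key at h
  unfold pvMatchAt
  simp only [List.drop_zero]
  simp only [PySem.Str.startswith] at h
  split_ifs with h1 h2 h3 h4
  · exact ⟨"atlas", 6, rfl⟩
  · exact ⟨"atlas", 5, rfl⟩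
  · exact ⟨"source", 7, rfl⟩
  · exact ⟨"desc", 5, rfl⟩
  · exfalso
    simp only [Bool.or_eq_true] at h
    rcases h with ((hh | hh) | hh) | hh
    · exact h1 hh
    · exact h2 hh
    · exact h3 hh
    · exact h4 hh

-- ===== VERDICT (by name: the statement is the Claim_ definition above) =====
theorem parse_result_key_spec : Claim_equal_parse_result_key := by
  intro key _hdom hpre
  unfold Spec_parse_result_key
  obtain ⟨n0, p0, hm⟩ := pre_matchAt hpre
  have hne : key.toList ≠ [] := by
    intro h
    rw [h, matchAt_nil] at hm
    simp at hm
  unfold parse_result_key parse_result_key_alt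
  rw [if_neg hne, if_neg hne, splitOn_eq_splitU, pvMatches_eq]
  rcases decomp_sep key.toList with hsep | ⟨a, b, ha, hab⟩
  · -- no '_' in the key: a single segment
    rw [splitU_no_sep hsep]
    rw [A_eq_pairs key.toList [] hm]
    have hms : segsMatches 0 [key.toList] = [(0, n0, 0 + p0)] := by
      simp [segsMatches, hm]
    rw [hms]
    show _ = (pvAssign key.toList (PySem.Dict.mk []) [(0, n0, 0 + p0)]).items
    rw [assign_eq]
    have hpairs : pairsB key.toList [(0, n0, 0 + p0)]
        = pairsSegs n0 [key.toList.drop p0] [] := by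
      simp only [pairsB, pairsSegs, joinU, Nat.zero_add]
      have htake : (key.toList.drop p0).take (key.toList.length - p0)
          = key.toList.drop p0 := by
        apply List.take_of_length_le
        simp
      rw [htake]
    rw [hpairs]
  · -- key = a ++ '_' :: b
    have hma : pvMatchAt a 0 = some (n0, p0) := by
      rw [hab, matchAt_append] at hm
      exact hm
    have hp0 : p0 ≤ a.length := matchAt_le hma
    rw [hab, splitU_append b ha]
    rw [A_eq_pairs a (splitU b) hma]
    have hms : segsMatches 0 (a :: splitU b)
        = (0, n0, 0 + p0) :: segsMatches (a.length + 1) (splitU b) := by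
      simp [segsMatches, hma]
    rw [hms]
    show _ = (pvAssign (a ++ '_' :: b) (PySem.Dict.mk [])
        ((0, n0, 0 + p0) :: segsMatches (a.length + 1) (splitU b))).items
    rw [assign_eq]
    have hpairs : pairsB (a ++ '_' :: b)
        ((0, n0, 0 + p0) :: segsMatches (a.length + 1) (splitU b))
        = pairsSegs n0 [a.drop p0] (splitU b) := by
      have h0p : (0 : Nat) + p0 = p0 := by omega
      rw [h0p]
      rw [show a.length + 1 = a.length + 1 from rfl]
      apply pairsB_eq (a ++ '_' :: b) (splitU b) a.length p0 n0 [a.drop p0] 0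
      · simp
      · exact hp0
      · rw [if_neg (splitU_ne_nil b), joinU_splitU, List.drop_left]
      · rw [List.drop_append_of_le_length hp0]
        rw [show a.length - p0 = (a.drop p0).length by simp]
        rw [List.take_left]
        rfl
      · simp
    rw [hpairs]
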